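-- pv_equiv track=rewrite | github.com/lingpy/evaluation-paper | old/pkg/evaluate.py | renumber
-- ===== SOURCE A (Python) =====
-- def renumber(liste):
--     x = {}
--     count = 1
--     out = []
--     for idx in liste:
--         if idx in x:
--             out += [x[idx]]
--         else:
--             out += [count]
--             x[idx] = count
--             count += 1
--     return out
-- ===== SOURCE B (Python) =====
-- def renumber(liste):
--     # Stateless brute force: each element's number is 1 + the count of
--     # distinct values occurring strictly before its first occurrence.
--     return [len(set(liste[:liste.index(v)])) + 1 for v in liste]
-- ===== Notes on version B (the rewrite author's own statement) =====
-- stated objective: alternative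
-- what changed: B drops A's dict/counter state entirely: each output is computed independently as 1 + the number of distinct values in the prefix before the element's first occurrence (list.index + set of a slice), a stateless O(n^2) formulation of first-appearance numbering instead of A's incremental single pass.
import Mathlib
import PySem

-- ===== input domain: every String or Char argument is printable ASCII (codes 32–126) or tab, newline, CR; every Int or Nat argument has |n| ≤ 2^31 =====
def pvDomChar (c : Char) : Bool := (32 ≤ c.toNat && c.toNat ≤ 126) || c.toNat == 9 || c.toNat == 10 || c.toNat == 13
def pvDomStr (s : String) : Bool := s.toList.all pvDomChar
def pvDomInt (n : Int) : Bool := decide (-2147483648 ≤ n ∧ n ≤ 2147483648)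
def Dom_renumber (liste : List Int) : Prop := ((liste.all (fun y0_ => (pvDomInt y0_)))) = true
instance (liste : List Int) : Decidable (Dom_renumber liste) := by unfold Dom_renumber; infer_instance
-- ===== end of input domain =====

-- B replaces A's incremental dict+counter pass by a stateless per-element formula
-- (1 + distinct values before the element's first occurrence); objective: alternative.


-- ===== PORT A =====
-- A's single loop: state is the dict x, the counter, and the accumulated output.
def renumberLoop : List Int → PySem.Dict Int Int → Int → List Int → List Int
  | [], _x, _count, out => out
  | idx :: rest, x, count, out =>
    match x.get? idx with
    | some v => renumberLoop rest x count (out ++ [v])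
    | none => renumberLoop rest (x.insert idx count) (count + 1) (out ++ [count])

def renumber (liste : List Int) : List Int :=
  renumberLoop liste PySem.Dict.empty 1 []

-- ===== PORT B =====
-- B's per-element formula: len(set(liste[:liste.index(v)])) + 1.
-- liste.index(v) always succeeds here (v is drawn from liste); the none branch is an
-- unreachable totalization guard.
def bnum (liste : List Int) (v : Int) : Int :=
  match PySem.List.index? liste v with
  | some j => ((PySem.Set.ofList (PySem.List.slice liste none (some (j : Int)))).length : Int) + 1
  | none => 0

def renumber_alt (liste : List Int) : List Int :=
  liste.map (bnum liste)

-- ===== PRECONDITION & SPEC =====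
def Spec_renumber (liste : List Int) (out : List Int) : Prop := out = renumber_alt liste
instance (liste : List Int) (out : List Int) : Decidable (Spec_renumber liste out) := by unfold Spec_renumber; infer_instance

-- ===== CLAIM (what is proved, stated in full; the proofs are below) =====
def Claim_equal_renumber : Prop := ∀ (liste : List Int), Dom_renumber liste → Spec_renumber liste (renumber liste)

-- ===== LEMMAS AND PROOFS =====

-- for a fresh key at the head of the remainder, B's formula yields exactly A's counter
theorem bnum_fresh (p rest : List Int) (idx : Int) (h : idx ∉ p) :
    bnum (p ++ idx :: rest) idx = ((PySem.Set.ofList p).length : Int) + 1 := by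
  have hidx : PySem.List.index? (p ++ idx :: rest) idx = some p.length :=
    (PySem.List.index?_eq_some_iff _ _ _).2 ⟨p, rest, rfl, rfl, h⟩
  have hsl : PySem.List.slice (p ++ idx :: rest) none (some ((p.length : Nat) : Int))
      = (p ++ idx :: rest).take p.length := PySem.List.slice_to_natCast _ _
  rw [PySem.List.index?_eq_idxOf?] at hidx
  simp only [bnum, PySem.List.index?_eq_idxOf?, hidx, hsl, List.take_left]

-- main invariant of A's loop: if the dict records bnum for exactly the processed prefix
-- and the counter is |set(prefix)| + 1, the loop emits the bnum of each remaining element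
theorem loop_eq (L : List Int) : ∀ (rest p : List Int) (x : PySem.Dict Int Int) (out : List Int),
    L = p ++ rest →
    (∀ v, x.get? v = if v ∈ p then some (bnum L v) else none) →
    renumberLoop rest x (((PySem.Set.ofList p).length : Int) + 1) out = out ++ rest.map (bnum L) := by
  intro rest
  induction rest with
  | nil => intro p x out _ _; simp [renumberLoop]
  | cons idx rest ih =>
    intro p x out hL hx
    have hL' : L = (p ++ [idx]) ++ rest := by simpa using hL
    by_cases hmem : idx ∈ p
    · have hget : x.get? idx = some (bnum L idx) := by rw [hx]; simp [hmem]
      have hset : PySem.Set.ofList (p ++ [idx]) = PySem.Set.ofList p := by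
        rw [PySem.Set.ofList_append_singleton, PySem.Set.add_of_mem]
        rwa [PySem.Set.mem_ofList]
      have hx' : ∀ v, x.get? v = if v ∈ p ++ [idx] then some (bnum L v) else none := by
        intro v; rw [hx]
        by_cases hv : v ∈ p
        · simp [hv]
        · have : v ≠ idx := fun he => hv (he ▸ hmem)
          simp [hv, this]
      have := ih (p ++ [idx]) x (out ++ [bnum L idx]) hL' hx'
      rw [hset] at this
      simp only [renumberLoop, hget, this, List.map_cons, List.append_assoc, List.cons_append,
        List.nil_append]
    · have hget : x.get? idx = none := by rw [hx]; simp [hmem]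
      have hb : bnum L idx = ((PySem.Set.ofList p).length : Int) + 1 := by
        rw [hL]; exact bnum_fresh p rest idx hmem
      have hset : PySem.Set.ofList (p ++ [idx]) = PySem.Set.ofList p ++ [idx] := by
        rw [PySem.Set.ofList_append_singleton, PySem.Set.add_of_not_mem]
        rwa [PySem.Set.mem_ofList]
      have hx' : ∀ v, (x.insert idx (((PySem.Set.ofList p).length : Int) + 1)).get? v
          = if v ∈ p ++ [idx] then some (bnum L v) else none := by
        intro v
        by_cases hv : v = idx
        · subst hv
          rw [PySem.Dict.get?_insert_self, hb]; simp
        · rw [PySem.Dict.get?_insert_of_ne _ _ hv, hx]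
          simp [hv]
      have := ih (p ++ [idx]) _ (out ++ [((PySem.Set.ofList p).length : Int) + 1]) hL' hx'
      rw [hset] at this
      simp only [List.length_append, List.length_cons, List.length_nil] at this
      simp only [renumberLoop, hget, List.map_cons, hb]
      rw [show ((PySem.Set.ofList p).length : Int) + 1 + 1
            = (((PySem.Set.ofList p).length + 0 + 1 : Nat) : Int) + 1 by push_cast; ring]
      rw [this]
      simp [List.append_assoc]

-- ===== VERDICT (by name: the statement is the Claim_ definition above) =====
theorem renumber_spec : Claim_equal_renumber := by
  intro liste _hdom
  unfold Spec_renumber renumber renumber_alt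
  have h := loop_eq liste liste [] PySem.Dict.empty [] (by simp)
    (by intro v; simp [PySem.Dict.get?_empty])
  simpa using h
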